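-- pv_equiv track=rewrite | github.com/jakechinchar234/LogAnalyzerTask | LogAnalyzerWithIt2.py | process_ws_hex_data
-- ===== SOURCE A (Python) =====
-- def process_ws_hex_data(ws_hex_data: str, msg_type_raw: str) -> str:
--     if not ws_hex_data:
--         return ws_hex_data
--     parts = ws_hex_data.strip().split()
--
--     # Find index of sequence
--     idx = None
--     for i in range(len(parts) - 3):
--         if parts[i:i+4] == ['02', '02', '12', '8b'] or parts[i:i+4] == ['02', '02', '12', '01']:
--             idx = i + 4  # position after the sequence
--             break
--     if idx is None:
--         return ws_hex_data  # no change if sequence not found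
--     # Remove everything before and including sequence
--     trimmed = parts[idx:]
--     # Remove next four pairs if available
--     trimmed = trimmed[4:] if len(trimmed) > 4 else []
--
--     # If the message type is 12 8b, then the last hexadecimal pair needs to be removed
--     if msg_type_raw == '12 8B' and len(trimmed) > 0:
--         trimmed = trimmed[:-1]
--
--     return ' '.join(trimmed)
-- ===== SOURCE B (Python) =====
-- def process_ws_hex_data(ws_hex_data: str, msg_type_raw: str) -> str:
--     if not ws_hex_data:
--         return ws_hex_data
--     # Space-padded joined token string: every token boundary is a single space.
--     padded = ' ' + ' '.join(ws_hex_data.split()) + ' '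
--     p1 = padded.find(' 02 02 12 8b ')
--     p2 = padded.find(' 02 02 12 01 ')
--     if p1 == -1:
--         pos = p2
--     elif p2 == -1:
--         pos = p1
--     else:
--         pos = min(p1, p2)
--     if pos == -1:
--         return ws_hex_data
--     # Both markers are 13 characters long; everything after the marker, re-tokenised.
--     rest = padded[pos + 13:].split()
--     trimmed = rest[4:] if len(rest) > 4 else []
--     if msg_type_raw == '12 8B' and trimmed:
--         trimmed = trimmed[:-1]
--     return ' '.join(trimmed)
-- ===== Notes on version B (the rewrite author's own statement) =====
-- stated objective: idiomatic
-- what changed: B drops the index loop with 4-element slice comparisons and instead locates the marker with str.find on the space-padded joined token string (' ' + ' '.join(parts) + ' '), searching for ' 02 02 12 8b ' and ' 02 02 12 01 ', taking the earliest hit and re-splitting the padded string after the 13-character marker, so the search and the trim both work on one string instead of token slices.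
import Mathlib
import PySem

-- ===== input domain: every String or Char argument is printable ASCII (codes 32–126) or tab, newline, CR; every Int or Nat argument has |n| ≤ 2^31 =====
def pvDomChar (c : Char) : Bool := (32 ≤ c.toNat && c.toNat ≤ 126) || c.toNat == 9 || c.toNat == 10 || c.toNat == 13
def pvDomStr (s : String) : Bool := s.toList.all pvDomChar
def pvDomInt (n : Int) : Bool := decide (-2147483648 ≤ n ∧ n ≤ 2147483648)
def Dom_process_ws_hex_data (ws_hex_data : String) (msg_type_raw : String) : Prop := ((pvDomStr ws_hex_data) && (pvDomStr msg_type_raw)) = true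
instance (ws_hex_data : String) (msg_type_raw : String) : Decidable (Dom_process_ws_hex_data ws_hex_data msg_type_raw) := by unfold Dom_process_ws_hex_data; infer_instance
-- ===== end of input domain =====

-- B replaces A's token-position scan with 4-element slice comparisons by a substring search
-- (str.find) for the two space-anchored markers in the space-padded joined token string
-- (objective: idiomatic; same return value — neither function mutates anything).

-- ===== PORT A =====
-- A's search loop: 'for i in range(len(parts) - 3): if parts[i:i+4] == [...]: idx = i + 4; break'.
def pvAFind (parts : List String) : List Int → Option Int
  | [] => none
  | i :: rest =>
    if PySem.List.slice parts (some i) (some (i + 4)) = ["02", "02", "12", "8b"]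
        ∨ PySem.List.slice parts (some i) (some (i + 4)) = ["02", "02", "12", "01"] then
      some (i + 4)
    else pvAFind parts rest

def process_ws_hex_data (ws_hex_data : String) (msg_type_raw : String) : String :=
  if ws_hex_data = "" then ws_hex_data
  else
    let parts := PySem.Str.split₀ (PySem.Str.strip ws_hex_data)
    match pvAFind parts (PySem.List.pyRange 0 ((parts.length : Int) - 3) 1) with
    | none => ws_hex_data
    | some idx =>
      let trimmed := PySem.List.slice parts (some idx) none
      let trimmed := if 4 < trimmed.length then PySem.List.slice trimmed (some 4) none else []
      let trimmed := if msg_type_raw = "12 8B" ∧ 0 < trimmed.length then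
          PySem.List.slice trimmed none (some (-1)) else trimmed
      PySem.Str.join " " trimmed

-- ===== PORT B =====
def process_ws_hex_data_alt (ws_hex_data : String) (msg_type_raw : String) : String :=
  if ws_hex_data = "" then ws_hex_data
  else
    let padded := " " ++ PySem.Str.join " " (PySem.Str.split₀ ws_hex_data) ++ " "
    let p1 := PySem.Str.find padded " 02 02 12 8b "
    let p2 := PySem.Str.find padded " 02 02 12 01 "
    let pos := if p1 = -1 then p2 else if p2 = -1 then p1 else min p1 p2
    if pos = -1 then ws_hex_data
    else
      let rest := PySem.Str.split₀ (PySem.Str.slice padded (some (pos + 13)) none)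
      let trimmed := if 4 < rest.length then PySem.List.slice rest (some 4) none else []
      let trimmed := if msg_type_raw = "12 8B" ∧ trimmed ≠ [] then
          PySem.List.slice trimmed none (some (-1)) else trimmed
      PySem.Str.join " " trimmed

-- ===== PRECONDITION & SPEC =====
def Spec_process_ws_hex_data (ws_hex_data : String) (msg_type_raw : String) (out : String) : Prop := out = process_ws_hex_data_alt ws_hex_data msg_type_raw
instance (ws_hex_data : String) (msg_type_raw : String) (out : String) : Decidable (Spec_process_ws_hex_data ws_hex_data msg_type_raw out) := by unfold Spec_process_ws_hex_data; infer_instance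

-- ===== CLAIM (what is proved, stated in full; the proofs are below) =====
def Claim_equal_process_ws_hex_data : Prop := ∀ (ws_hex_data : String) (msg_type_raw : String), Dom_process_ws_hex_data ws_hex_data msg_type_raw → Spec_process_ws_hex_data ws_hex_data msg_type_raw (process_ws_hex_data ws_hex_data msg_type_raw)

-- ===== LEMMAS AND PROOFS =====

-- non-whitespace predicate used by the word-splitting analysis
def pvNS (d : Char) : Bool := !PySem.Chars.isspace d

-- every token is nonempty and whitespace-free
def pvNice (ps : List (List Char)) : Prop := ∀ t ∈ ps, t ≠ [] ∧ ∀ c ∈ t, PySem.Chars.isspace c = false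

-- ' '.join(ps) with one space after every token (no leading space)
def pvBody : List (List Char) → List Char
  | [] => []
  | t :: ts => t ++ ' ' :: pvBody ts

-- ' ' + ' '.join(ps) + ' ' for ps ≠ []
def pvPad (ps : List (List Char)) : List Char := ' ' :: pvBody ps

-- character offset of the space standing immediately before token i in pvPad ps
def pvOff : List (List Char) → Nat → Nat
  | _, 0 => 0
  | [], _ + 1 => 0
  | t :: ts, i + 1 => t.length + 1 + pvOff ts i

-- first token index where m is a (token-level) prefix of the remaining tokens
def pvTokIdx (m : List (List Char)) : List (List Char) → Option Nat
  | [] => none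
  | t :: ts => if m <+: (t :: ts) then some 0 else (pvTokIdx m ts).map (· + 1)

-- reference word splitter (Python str.split())
def pvWords : List Char → List (List Char)
  | [] => []
  | c :: rest =>
    if PySem.Chars.isspace c then pvWords rest
    else (c :: rest.takeWhile pvNS) :: pvWords (rest.dropWhile pvNS)
termination_by s => s.length
decreasing_by
  · simp
  · exact Nat.lt_succ_of_le (List.length_dropWhile_le _ _)

def pvMk8 : List (List Char) := [['0','2'],['0','2'],['1','2'],['8','b']]
def pvMk1 : List (List Char) := [['0','2'],['0','2'],['1','2'],['0','1']]

-- A's loop test at integer index i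
def pvQ (parts : List String) (i : Int) : Prop :=
  PySem.List.slice parts (some i) (some (i + 4)) = ["02", "02", "12", "8b"]
    ∨ PySem.List.slice parts (some i) (some (i + 4)) = ["02", "02", "12", "01"]

lemma pvNotSpace {c : Char} (h : PySem.Chars.isspace c = false) : c ≠ ' ' := by
  intro e; subst e; simp [PySem.Chars.isspace] at h
lemma pvH (u : List Char) : ∀ (t r s : List Char), (∀ c ∈ u, c ≠ ' ') → (∀ c ∈ t, c ≠ ' ') →
    ((u ++ ' ' :: r) <+: (t ++ ' ' :: s) ↔ t = u ∧ r <+: s) := by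
  induction u with
  | nil =>
    intro t r s _ ht
    cases t with
    | nil => simp
    | cons c t' =>
      simp only [List.nil_append, List.cons_append, List.cons_prefix_cons]
      constructor
      · rintro ⟨h1, -⟩; exact absurd h1.symm (ht c (by simp))
      · rintro ⟨h1, -⟩; exact absurd h1 (by simp)
  | cons a u' ih =>
    intro t r s hu ht
    cases t with
    | nil =>
      simp only [List.nil_append, List.cons_append, List.cons_prefix_cons]
      constructor
      · rintro ⟨h1, -⟩; exact absurd h1 (hu a (by simp))
      · rintro ⟨h1, -⟩; exact absurd h1.symm (by simp)
    | cons b t' =>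
      simp only [List.cons_append, List.cons_prefix_cons]
      rw [ih t' r s (fun c hc => hu c (by simp [hc])) (fun c hc => ht c (by simp [hc]))]
      constructor
      · rintro ⟨h1, h2, h3⟩; exact ⟨by rw [h1, h2], h3⟩
      · rintro ⟨h1, h2⟩; cases h1; exact ⟨rfl, rfl, h2⟩
lemma pvPad_cons (t : List Char) (ts : List (List Char)) :
    pvPad (t :: ts) = ' ' :: (t ++ pvPad ts) := by
  simp [pvPad, pvBody]
lemma pvNiceNS {ps : List (List Char)} (h : pvNice ps) {t : List Char} (ht : t ∈ ps) :
    ∀ c ∈ t, c ≠ ' ' := fun c hc => pvNotSpace ((h t ht).2 c hc)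
lemma pvL1 (m : List (List Char)) : ∀ (ps : List (List Char)), pvNice m → pvNice ps →
    (pvPad m <+: pvPad ps ↔ m <+: ps) := by
  induction m with
  | nil =>
    intro ps _ _
    simp [pvPad, pvBody, List.cons_prefix_cons]
  | cons t m' ih =>
    intro ps hm hps
    cases ps with
    | nil =>
      constructor
      · intro h
        have := h.length_le
        simp [pvPad, pvBody] at this
      · intro h; exact absurd h (by simp)
    | cons u ps' =>
      rw [pvPad_cons, pvPad_cons]
      simp only [List.cons_prefix_cons, true_and]
      have hm' : pvNice m' := fun x hx => hm x (by simp [hx])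
      have hps' : pvNice ps' := fun x hx => hps x (by simp [hx])
      have hpadm' : pvPad m' = ' ' :: pvBody m' := rfl
      have hpadp' : pvPad ps' = ' ' :: pvBody ps' := rfl
      rw [hpadm', hpadp',
        pvH t u (pvBody m') (pvBody ps') (pvNiceNS hm (by simp)) (pvNiceNS hps (by simp))]
      have hb : pvBody m' <+: pvBody ps' ↔ m' <+: ps' := by
        rw [← ih ps' hm' hps']; simp [pvPad, List.cons_prefix_cons]
      rw [hb]
      constructor <;> (rintro ⟨h1, h2⟩; exact ⟨h1.symm, h2⟩)
lemma pvFindEq (s sub : List Char) (k : Nat) (h1 : sub <+: s.drop k)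
    (h2 : ∀ j < k, ¬ sub <+: s.drop j) : PySem.Chars.find s sub = k := by
  have hinf : sub <:+: s := h1.isInfix.trans (List.drop_suffix k s).isInfix
  have hnn : 0 ≤ PySem.Chars.find s sub := (PySem.Chars.find_nonneg_iff s sub).mpr hinf
  obtain ⟨hp, hmin⟩ := PySem.Chars.find_spec hnn
  rcases lt_trichotomy (PySem.Chars.find s sub).toNat k with h | h | h
  · exact absurd hp (h2 _ h)
  · omega
  · exact absurd h1 (hmin k h)
lemma pvDropConsPad (t : List Char) (ts : List (List Char)) (k : Nat) :
    (pvPad (t :: ts)).drop (t.length + 1 + k) = (pvPad ts).drop k := by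
  rw [pvPad_cons]
  have : (' ' :: (t ++ pvPad ts)) = (' ' :: t) ++ pvPad ts := by simp
  rw [this]
  have hl : (' ' :: t).length = t.length + 1 := by simp [Nat.add_comm]
  rw [show t.length + 1 + k = (' ' :: t).length + k by omega,
    List.drop_length_add_append]
lemma pvMid (m t : List Char) (ts : List (List Char)) (ht : ∀ c ∈ t, PySem.Chars.isspace c = false)
    (j : Nat) (hj1 : 1 ≤ j) (hj2 : j ≤ t.length) :
    ¬ (' ' :: m) <+: (pvPad (t :: ts)).drop j := by
  intro h
  rw [pvPad_cons] at h
  obtain ⟨j', rfl⟩ : ∃ j', j = j' + 1 := ⟨j - 1, by omega⟩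
  rw [List.drop_succ_cons] at h
  rw [List.drop_append_of_le_length (by omega)] at h
  have hne : t.drop j' ≠ [] := by
    intro e
    have := congrArg List.length e
    simp at this; omega
  obtain ⟨c, t'', hct⟩ := List.exists_cons_of_ne_nil hne
  rw [hct] at h
  rw [List.cons_append, List.cons_prefix_cons] at h
  have hc : c ∈ t := List.drop_subset _ t (by rw [hct]; simp)
  exact pvNotSpace (ht c hc) h.1.symm
lemma pvOcc (m t : List Char) (m' ts : List (List Char)) (ht : ∀ c ∈ t, PySem.Chars.isspace c = false)
    (hm : pvNice (m :: m')) (hps : pvNice (t :: ts)) (j : Nat)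
    (h : pvPad (m :: m') <+: (pvPad (t :: ts)).drop j) :
    (j = 0 ∧ (m :: m') <+: (t :: ts)) ∨
      (t.length + 1 ≤ j ∧ pvPad (m :: m') <+: (pvPad ts).drop (j - (t.length + 1))) := by
  rcases Nat.lt_or_ge j 1 with hj | hj
  · left
    have hj0 : j = 0 := by omega
    subst hj0
    rw [List.drop_zero] at h
    exact ⟨rfl, (pvL1 (m :: m') (t :: ts) hm hps).mp h⟩
  · rcases Nat.lt_or_ge t.length j with hj2 | hj2
    · right
      refine ⟨by omega, ?_⟩
      have he : j = t.length + 1 + (j - (t.length + 1)) := by omega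
      rw [he, pvDropConsPad] at h
      exact h
    · exact absurd h (by
        have := pvMid (m ++ ' ' :: pvBody m') t ts ht j hj hj2
        simpa [pvPad, pvBody] using this)
lemma pvTokIdx_some_spec (m : List (List Char)) : ∀ (ps : List (List Char)) (i : Nat),
    pvTokIdx m ps = some i → m <+: ps.drop i ∧ ∀ j < i, ¬ m <+: ps.drop j := by
  intro ps
  induction ps with
  | nil => intro i h; simp [pvTokIdx] at h
  | cons t ts ih =>
    intro i h
    by_cases h0 : m <+: (t :: ts)
    · simp [pvTokIdx, h0] at h
      subst h
      exact ⟨by simpa using h0, by omega⟩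
    · simp [pvTokIdx, h0] at h
      obtain ⟨i', hi', rfl⟩ := h
      obtain ⟨h1, h2⟩ := ih i' hi'
      refine ⟨by simpa using h1, ?_⟩
      intro j hj
      cases j with
      | zero => simpa using h0
      | succ j' => simpa using h2 j' (by omega)

lemma pvTokIdx_none_spec (m : List (List Char)) (hm : m ≠ []) : ∀ (ps : List (List Char)),
    pvTokIdx m ps = none → ∀ j, ¬ m <+: ps.drop j := by
  intro ps
  induction ps with
  | nil =>
    intro _ j h
    rw [List.drop_nil] at h
    exact hm (List.prefix_nil.mp h)
  | cons t ts ih =>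
    intro h j
    by_cases h0 : m <+: (t :: ts)
    · simp [pvTokIdx, h0] at h
    · simp [pvTokIdx, h0] at h
      cases j with
      | zero => simpa using h0
      | succ j' => simpa using ih h j'

lemma pvTokIdx_some_lt (m : List (List Char)) (hm : m ≠ []) (ps : List (List Char)) (i : Nat)
    (h : pvTokIdx m ps = some i) : i < ps.length := by
  obtain ⟨h1, -⟩ := pvTokIdx_some_spec m ps i h
  by_contra hc
  rw [List.drop_eq_nil_of_le (by omega)] at h1
  exact hm (List.prefix_nil.mp h1)

lemma pvMono (ps : List (List Char)) : ∀ (i j : Nat), i ≤ j → pvOff ps i ≤ pvOff ps j := by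
  induction ps with
  | nil => intro i j _; cases i <;> cases j <;> simp [pvOff]
  | cons t ts ih =>
    intro i j hij
    cases i with
    | zero => cases j <;> simp [pvOff]
    | succ i' =>
      cases j with
      | zero => omega
      | succ j' =>
        have := ih i' j' (by omega)
        simp [pvOff]; omega

lemma pvL2 (m ps : List (List Char)) (hm : pvNice m) (hmne : m ≠ []) (hps : pvNice ps) :
    PySem.Chars.find (pvPad ps) (pvPad m) =
      (pvTokIdx m ps).elim (-1) (fun i => (pvOff ps i : Int)) := by
  obtain ⟨m0, m', rfl⟩ := List.exists_cons_of_ne_nil hmne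
  induction ps with
  | nil =>
    simp only [pvTokIdx, Option.elim]
    rw [PySem.Chars.find_eq_neg_one_iff]
    intro hinf
    have := hinf.length_le
    simp [pvPad, pvBody] at this
  | cons t ts ih =>
    have hps' : pvNice ts := fun x hx => hps x (by simp [hx])
    have ht : ∀ c ∈ t, PySem.Chars.isspace c = false := fun c hc => (hps t (by simp)).2 c hc
    by_cases h0 : (m0 :: m') <+: (t :: ts)
    · rw [show pvTokIdx (m0 :: m') (t :: ts) = some 0 by simp [pvTokIdx, h0]]
      simp only [Option.elim]
      rw [pvFindEq _ _ 0 (by simpa using (pvL1 _ _ hm hps).mpr h0) (by omega)]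
      simp [pvOff]
    · have hrec := ih hps'
      rw [show pvTokIdx (m0 :: m') (t :: ts) = (pvTokIdx (m0 :: m') ts).map (· + 1) by
        simp [pvTokIdx, h0]]
      cases hti : pvTokIdx (m0 :: m') ts with
      | none =>
        simp only [hti, Option.map_none, Option.elim]
        rw [PySem.Chars.find_eq_neg_one_iff]
        intro hinf
        obtain ⟨j, hj⟩ := (PySem.Chars.exists_prefix_drop_iff_isIn _ _).mpr
          ((PySem.Chars.isIn_iff_infix _ _).mpr hinf)
        rcases pvOcc m0 t m' ts ht hm hps j hj with ⟨-, hpre⟩ | ⟨-, hpre⟩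
        · exact h0 hpre
        · rw [hti] at hrec
          simp only [Option.elim] at hrec
          exact (PySem.Chars.find_eq_neg_one_iff _ _).mp hrec
            (hpre.isInfix.trans (List.drop_suffix _ _).isInfix)
      | some i =>
        rw [hti] at hrec
        simp only [hti, Option.elim, Option.map_some]
        have hnn : (0 : Int) ≤ PySem.Chars.find (pvPad ts) (pvPad (m0 :: m')) := by
          rw [hrec]; exact Int.natCast_nonneg _
        obtain ⟨hp, hmin⟩ := PySem.Chars.find_spec hnn
        rw [hrec] at hp hmin
        simp at hp hmin
        rw [pvFindEq _ _ (t.length + 1 + pvOff ts i) ?_ ?_]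
        · simp [pvOff]
        · rw [pvDropConsPad]; exact hp
        · intro j hj hpre
          rcases pvOcc m0 t m' ts ht hm hps j hpre with ⟨-, hpre'⟩ | ⟨hj2, hpre'⟩
          · exact h0 hpre'
          · exact hmin _ (by omega) hpre'
lemma pvGoEq : ∀ (s cur : List Char) (acc : List (List Char)),
    PySem.Chars.split₀.go s cur acc =
      acc.reverse ++ (if cur = [] then pvWords s
        else (cur.reverse ++ s.takeWhile pvNS) :: pvWords (s.dropWhile pvNS)) := by
  intro s
  induction s with
  | nil =>
    intro cur acc
    by_cases hc : cur = []
    · simp [PySem.Chars.split₀.go, hc, pvWords, List.isEmpty_iff]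
    · simp [PySem.Chars.split₀.go, hc, pvWords, List.isEmpty_iff]
  | cons c rest ih =>
    intro cur acc
    by_cases hsp : PySem.Chars.isspace c
    · by_cases hc : cur = []
      · rw [show PySem.Chars.split₀.go (c :: rest) cur acc = PySem.Chars.split₀.go rest [] acc by
          simp [PySem.Chars.split₀.go, hsp, hc, List.isEmpty_iff]]
        rw [ih [] acc]
        simp [hc, pvWords, hsp]
      · rw [show PySem.Chars.split₀.go (c :: rest) cur acc
            = PySem.Chars.split₀.go rest [] (cur.reverse :: acc) by
          simp [PySem.Chars.split₀.go, hsp, hc, List.isEmpty_iff]]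
        rw [ih [] (cur.reverse :: acc)]
        simp [hc, pvWords, hsp, pvNS, List.takeWhile, List.dropWhile]
    · rw [show PySem.Chars.split₀.go (c :: rest) cur acc
          = PySem.Chars.split₀.go rest (c :: cur) acc by
        simp [PySem.Chars.split₀.go, hsp]]
      rw [ih (c :: cur) acc]
      by_cases hc : cur = []
      · simp [hc, pvWords, hsp, pvNS]
      · simp [hc, pvWords, hsp, pvNS]

lemma pvSplitEq (s : List Char) : PySem.Chars.split₀ s = pvWords s := by
  rw [PySem.Chars.split₀, pvGoEq]
  simp

lemma pvWordsNice (s : List Char) : pvNice (pvWords s) := by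
  induction s using pvWords.induct with
  | case1 => intro t ht; simp [pvWords] at ht
  | case2 c rest hsp ih =>
    intro t ht
    rw [pvWords, if_pos hsp] at ht
    exact ih t ht
  | case3 c rest hsp ih =>
    intro t ht
    rw [pvWords, if_neg hsp] at ht
    rcases List.mem_cons.mp ht with rfl | h
    · refine ⟨by simp, ?_⟩
      intro d hd
      rcases List.mem_cons.mp hd with rfl | hd'
      · simpa using hsp
      · have := List.mem_takeWhile_imp hd'
        simpa [pvNS] using this
    · exact ih t h

lemma pvWordsPre : ∀ (w s : List Char), (∀ c ∈ w, PySem.Chars.isspace c = true) →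
    pvWords (w ++ s) = pvWords s := by
  intro w
  induction w with
  | nil => intro s _; simp
  | cons c w' ih =>
    intro s hw
    rw [List.cons_append, pvWords, if_pos (hw c (by simp))]
    exact ih s (fun d hd => hw d (by simp [hd]))

lemma pvWordsSpaces (w : List Char) (hw : ∀ c ∈ w, PySem.Chars.isspace c = true) :
    pvWords w = [] := by
  have h := pvWordsPre w [] hw
  rw [List.append_nil] at h
  rw [h, pvWords]

lemma pvWordsPost : ∀ (s w : List Char), (∀ c ∈ w, PySem.Chars.isspace c = true) →
    pvWords (s ++ w) = pvWords s := by
  intro s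
  induction s using pvWords.induct with
  | case1 => intro w hw; rw [List.nil_append, pvWordsSpaces w hw, pvWords]
  | case2 c rest hsp ih =>
    intro w hw
    rw [List.cons_append, pvWords, if_pos hsp, pvWords, if_pos hsp]
    exact ih w hw
  | case3 c rest hsp ih =>
    intro w hw
    rw [List.cons_append, pvWords, if_neg hsp, pvWords, if_neg hsp]
    have hwns : ∀ d ∈ w, pvNS d = false := by
      intro d hd; simp [pvNS, hw d hd]
    have hTWnil : w.takeWhile pvNS = [] := by
      cases w with
      | nil => rfl
      | cons d w' => simp [List.takeWhile, hwns d (by simp)]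
    have hDWself : w.dropWhile pvNS = w := by
      cases w with
      | nil => rfl
      | cons d w' => simp [List.dropWhile, hwns d (by simp)]
    by_cases hall : ∀ d ∈ rest, pvNS d = true
    · have h1 : rest.takeWhile pvNS = rest := List.takeWhile_eq_self_iff.mpr hall
      have h2 : rest.dropWhile pvNS = [] := List.dropWhile_eq_nil_iff.mpr hall
      rw [List.takeWhile_append, if_pos (by rw [h1]), List.dropWhile_append,
        if_pos (by rw [h2]; rfl), hTWnil, hDWself, h1, h2]
      rw [pvWordsSpaces w hw]
      simp [pvWords]
    · have h1 : (rest.takeWhile pvNS).length ≠ rest.length := by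
        intro he
        have := (List.takeWhile_prefix (l := rest) (p := pvNS)).eq_of_length he
        exact hall (fun d hd => List.mem_takeWhile_imp (this ▸ hd))
      have h2 : (rest.dropWhile pvNS).isEmpty = false := by
        rw [List.isEmpty_eq_false_iff]
        intro he
        exact hall (List.dropWhile_eq_nil_iff.mp he)
      rw [List.takeWhile_append, if_neg h1, List.dropWhile_append, h2]
      simp only [Bool.false_eq_true, if_false]
      rw [ih w hw]

lemma pvWordsStrip (s : List Char) : pvWords (PySem.Chars.strip s) = pvWords s := by
  have hpre : pvWords (PySem.Chars.lstrip s) = pvWords s := by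
    conv_rhs => rw [← List.takeWhile_append_dropWhile (p := PySem.Chars.isspace) (l := s)]
    rw [pvWordsPre _ _ (fun c hc => List.mem_takeWhile_imp hc)]
    rfl
  have hdec : PySem.Chars.lstrip s
      = PySem.Chars.strip s ++ ((PySem.Chars.lstrip s).reverse.takeWhile PySem.Chars.isspace).reverse := by
    rw [PySem.Chars.strip, PySem.Chars.rstrip]
    conv_lhs => rw [← List.reverse_reverse (PySem.Chars.lstrip s),
      ← List.takeWhile_append_dropWhile (p := PySem.Chars.isspace) (l := (PySem.Chars.lstrip s).reverse)]
    rw [List.reverse_append]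
  rw [← hpre, hdec, pvWordsPost]
  intro c hc
  exact List.mem_takeWhile_imp (List.mem_reverse.mp hc)

lemma pvWordsBody : ∀ (ps : List (List Char)), pvNice ps → pvWords (pvBody ps) = ps := by
  intro ps
  induction ps with
  | nil => intro _; rw [pvBody, pvWords]
  | cons t ts ih =>
    intro hn
    obtain ⟨htne, htns⟩ := hn t (by simp)
    obtain ⟨c, t', rfl⟩ := List.exists_cons_of_ne_nil htne
    have hcns : PySem.Chars.isspace c = false := htns c (by simp)
    have ht' : ∀ d ∈ t', pvNS d = true := by
      intro d hd; simp [pvNS, htns d (by simp [hd])]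
    rw [pvBody, List.cons_append, pvWords, if_neg (by simp [hcns])]
    have hspNS : pvNS ' ' = false := by decide
    have h1 : (t' ++ ' ' :: pvBody ts).takeWhile pvNS = t' := by
      rw [List.takeWhile_append, if_pos (by rw [List.takeWhile_eq_self_iff.mpr ht'])]
      simp [hspNS]
    have h2 : (t' ++ ' ' :: pvBody ts).dropWhile pvNS = ' ' :: pvBody ts := by
      rw [List.dropWhile_append, if_pos (by rw [List.dropWhile_eq_nil_iff.mpr ht']; rfl)]
      simp [hspNS]
    rw [h1, h2, pvWords, if_pos (by decide)]
    rw [ih (fun x hx => hn x (by simp [hx]))]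

lemma pvBodyJoin : ∀ (ps : List (List Char)), ps ≠ [] →
    PySem.Chars.join [' '] ps ++ [' '] = pvBody ps := by
  intro ps
  induction ps with
  | nil => intro h; exact absurd rfl h
  | cons t ts ih =>
    intro _
    cases ts with
    | nil => rw [PySem.Chars.join_singleton, pvBody, pvBody]
    | cons u ts' =>
      rw [PySem.Chars.join_cons_cons, pvBody, ← ih (by simp)]
      simp
lemma pvAFind_none (parts : List String) : ∀ (a b : Int),
    (∀ i : Int, a ≤ i → i < b → ¬ pvQ parts i) →
    pvAFind parts (PySem.List.pyRange a b 1) = none := by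
  intro a b
  induction hn : (b - a).toNat generalizing a with
  | zero =>
    intro _
    rw [PySem.List.pyRange_one_eq_nil (by omega), pvAFind]
  | succ n ih =>
    intro h
    rw [PySem.List.pyRange_one_cons (by omega), pvAFind]
    have hq := h a (le_refl a) (by omega)
    unfold pvQ at hq
    rw [if_neg hq]
    exact ih (a + 1) (by omega) (fun i h1 h2 => h i (by omega) h2)

lemma pvAFind_some (parts : List String) : ∀ (a b i0 : Int), a ≤ i0 → i0 < b → pvQ parts i0 →
    (∀ i : Int, a ≤ i → i < i0 → ¬ pvQ parts i) →
    pvAFind parts (PySem.List.pyRange a b 1) = some (i0 + 4) := by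
  intro a b
  induction hn : (b - a).toNat generalizing a with
  | zero => intro i0 h1 h2 _ _; omega
  | succ n ih =>
    intro i0 h1 h2 hQ hmin
    rw [PySem.List.pyRange_one_cons (by omega), pvAFind]
    by_cases ha : a = i0
    · subst ha
      unfold pvQ at hQ
      rw [if_pos hQ]
    · have hq := hmin a (le_refl a) (by omega)
      unfold pvQ at hq
      rw [if_neg hq]
      exact ih (a + 1) (by omega) i0 (by omega) h2 hQ (fun i ha1 ha2 => hmin i (by omega) ha2)

lemma pvQconv (parts : List String) (k : Nat) :
    pvQ parts (k : Int) ↔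
      (pvMk8 <+: (parts.map String.toList).drop k ∨ pvMk1 <+: (parts.map String.toList).drop k) := by
  have hs : PySem.List.slice parts (some (k : Int)) (some ((k : Int) + 4))
      = (parts.drop k).take 4 := by
    have := PySem.List.slice_natCast_add parts k 4
    simpa using this
  have hinj : Function.Injective (List.map String.toList) :=
    List.map_injective_iff.mpr (fun a b => String.toList_inj.mp)
  have conv1 : ∀ (mks : List String) (mkc : List (List Char)), mks.map String.toList = mkc →
      mkc.length = 4 →
      ((parts.drop k).take 4 = mks ↔ mkc <+: (parts.map String.toList).drop k) := by
    intro mks mkc hmk hlen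
    constructor
    · intro h
      rw [List.prefix_iff_eq_take, hlen, ← List.map_drop, ← List.map_take, h, hmk]
    · intro h
      apply hinj
      rw [List.map_take, List.map_drop, hmk]
      rw [List.prefix_iff_eq_take, hlen] at h
      exact h.symm
  rw [pvQ, hs, conv1 ["02", "02", "12", "8b"] pvMk8 (by decide) (by decide),
    conv1 ["02", "02", "12", "01"] pvMk1 (by decide) (by decide)]
lemma pvDropPad : ∀ (ps : List (List Char)) (i : Nat), i ≤ ps.length →
    (pvPad ps).drop (pvOff ps i) = pvPad (ps.drop i) := by
  intro ps
  induction ps with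
  | nil =>
    intro i h
    have hi : i = 0 := by simpa using h
    subst hi
    simp [pvOff]
  | cons t ts ih =>
    intro i h
    cases i with
    | zero => simp [pvOff]
    | succ i' =>
      rw [show pvOff (t :: ts) (i' + 1) = t.length + 1 + pvOff ts i' from rfl,
        pvDropConsPad, List.drop_succ_cons]
      exact ih i' (by simpa using h)

lemma pvDrop13 (ps : List (List Char)) (h : pvMk8 <+: ps ∨ pvMk1 <+: ps) :
    (pvPad ps).drop 13 = pvBody (ps.drop 4) := by
  rcases h with h | h <;>
    (obtain ⟨rest, hrest⟩ := h; subst hrest; simp [pvPad, pvBody, pvMk8, pvMk1])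

-- ---- assembly ----

def pvPS (ws : String) : List (List Char) := (PySem.Str.split₀ ws).map String.toList

def pvTail1 (L : List String) : List String :=
  if 4 < L.length then PySem.List.slice L (some 4) none else []

def pvTail (msg : String) (L : List String) : String :=
  PySem.Str.join " " (if msg = "12 8B" ∧ pvTail1 L ≠ [] then
    PySem.List.slice (pvTail1 L) none (some (-1)) else pvTail1 L)

def pvDisj (ws : String) (j : Nat) : Prop :=
  pvMk8 <+: (pvPS ws).drop j ∨ pvMk1 <+: (pvPS ws).drop j

lemma pvStrInj : Function.Injective (List.map String.toList) :=
  List.map_injective_iff.mpr (fun _ _ h => String.toList_inj.mp h)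

lemma pvSplitStrip (s : String) : PySem.Str.split₀ (PySem.Str.strip s) = PySem.Str.split₀ s := by
  apply pvStrInj
  rw [PySem.Str.split₀_map_toList, PySem.Str.split₀_map_toList, PySem.Str.toList_strip,
    pvSplitEq, pvSplitEq, pvWordsStrip]

lemma pvPSwords (ws : String) : pvPS ws = pvWords ws.toList := by
  rw [pvPS, PySem.Str.split₀_map_toList, pvSplitEq]

lemma pvPSnice (ws : String) : pvNice (pvPS ws) := by
  rw [pvPSwords]; exact pvWordsNice _

lemma pvTokIdxEq (m : List (List Char)) (hm : m ≠ []) (ps : List (List Char)) (i : Nat)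
    (hpre : m <+: ps.drop i) (hmin : ∀ j < i, ¬ m <+: ps.drop j) : pvTokIdx m ps = some i := by
  cases h : pvTokIdx m ps with
  | none => exact absurd hpre (pvTokIdx_none_spec m hm ps h i)
  | some j =>
    obtain ⟨h1, h2⟩ := pvTokIdx_some_spec m ps j h
    rcases lt_trichotomy j i with hlt | rfl | hgt
    · exact absurd h1 (hmin j hlt)
    · rfl
    · exact absurd hpre (h2 i hgt)

lemma pvTokIdxGe (m : List (List Char)) (ps : List (List Char)) (i : Nat)
    (h : ∀ j < i, ¬ m <+: ps.drop j) : ∀ j, pvTokIdx m ps = some j → i ≤ j := by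
  intro j hj
  obtain ⟨h1, -⟩ := pvTokIdx_some_spec m ps j hj
  by_contra hc
  exact h j (by omega) h1

lemma pvDisjLen (ws : String) (i : Nat) (h : pvDisj ws i) : i + 4 ≤ (pvPS ws).length := by
  have hl : ∀ m : List (List Char), m.length = 4 → m <+: (pvPS ws).drop i →
      i + 4 ≤ (pvPS ws).length := by
    intro m hm hpre
    have := hpre.length_le
    rw [hm, List.length_drop] at this
    omega
  rcases h with h | h
  · exact hl _ (by decide) h
  · exact hl _ (by decide) h

-- A's output, no marker anywhere
lemma pvAresNone (ws msg : String) (hws : ¬ ws = "") (h : ∀ j : Nat, ¬ pvDisj ws j) :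
    process_ws_hex_data ws msg = ws := by
  rw [process_ws_hex_data, if_neg hws]
  simp only [pvSplitStrip]
  rw [pvAFind_none _ 0 _ ?_]
  intro i h0 _ hQ
  obtain ⟨k, rfl⟩ : ∃ k : Nat, i = (k : Int) := ⟨i.toNat, by omega⟩
  exact h k ((pvQconv _ k).mp hQ)

-- A's output at the first marker index
lemma pvAresSome (ws msg : String) (hws : ¬ ws = "") (i : Nat) (hd : pvDisj ws i)
    (hmin : ∀ j < i, ¬ pvDisj ws j) :
    process_ws_hex_data ws msg = pvTail msg ((PySem.Str.split₀ ws).drop (i + 4)) := by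
  rw [process_ws_hex_data, if_neg hws]
  simp only [pvSplitStrip]
  have hlen : (pvPS ws).length = (PySem.Str.split₀ ws).length := by
    rw [pvPS, List.length_map]
  have hi4 := pvDisjLen ws i hd
  rw [pvAFind_some _ 0 _ (i : Int) (by omega) (by omega) ((pvQconv _ i).mpr hd) ?_]
  · simp only
    rw [show (i : Int) + 4 = ((i + 4 : Nat) : Int) by push_cast; ring,
      PySem.List.slice_from_natCast]
    rw [pvTail, pvTail1]
    by_cases h4 : 4 < ((PySem.Str.split₀ ws).drop (i + 4)).length
    · rw [if_pos h4]
      by_cases hmsg : msg = "12 8B" <;>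
        simp [hmsg, List.length_pos_iff]
    · rw [if_neg h4]
      simp
  · intro j h0 hj hQ
    obtain ⟨k, rfl⟩ : ∃ k : Nat, j = (k : Int) := ⟨j.toNat, by omega⟩
    exact hmin k (by omega) ((pvQconv _ k).mp hQ)

lemma pvPadToList (ws : String) (h : pvPS ws ≠ []) :
    (" " ++ PySem.Str.join " " (PySem.Str.split₀ ws) ++ " ").toList = pvPad (pvPS ws) := by
  rw [String.toList_append, String.toList_append, PySem.Str.toList_join]
  rw [show (" " : String).toList = [' '] from rfl]
  rw [show (PySem.Str.split₀ ws).map String.toList = pvPS ws from rfl]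
  rw [List.append_assoc, pvBodyJoin _ h, pvPad, List.singleton_append]

lemma pvMk8str : (" 02 02 12 8b " : String).toList = pvPad pvMk8 := by
  simp [pvPad, pvBody, pvMk8]

lemma pvMk1str : (" 02 02 12 01 " : String).toList = pvPad pvMk1 := by
  simp [pvPad, pvBody, pvMk1]

lemma pvMk8nice : pvNice pvMk8 := by
  intro t ht
  simp [pvMk8] at ht
  rcases ht with rfl | rfl | rfl | rfl <;>
    exact ⟨by simp, by intro c hc; simp at hc; rcases hc with rfl | rfl <;> decide⟩

lemma pvMk1nice : pvNice pvMk1 := by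
  intro t ht
  simp [pvMk1] at ht
  rcases ht with rfl | rfl | rfl | rfl <;>
    exact ⟨by simp, by intro c hc; simp at hc; rcases hc with rfl | rfl <;> decide⟩

lemma pvFind8 (ws : String) (h : pvPS ws ≠ []) :
    PySem.Str.find (" " ++ PySem.Str.join " " (PySem.Str.split₀ ws) ++ " ") " 02 02 12 8b " =
      (pvTokIdx pvMk8 (pvPS ws)).elim (-1) (fun i => (pvOff (pvPS ws) i : Int)) := by
  rw [PySem.Str.find_eq, pvPadToList ws h,
    pvMk8str]
  exact pvL2 _ _ pvMk8nice (by decide) (pvPSnice ws)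

lemma pvFind1 (ws : String) (h : pvPS ws ≠ []) :
    PySem.Str.find (" " ++ PySem.Str.join " " (PySem.Str.split₀ ws) ++ " ") " 02 02 12 01 " =
      (pvTokIdx pvMk1 (pvPS ws)).elim (-1) (fun i => (pvOff (pvPS ws) i : Int)) := by
  rw [PySem.Str.find_eq, pvPadToList ws h,
    pvMk1str]
  exact pvL2 _ _ pvMk1nice (by decide) (pvPSnice ws)

-- B's output, no marker anywhere
lemma pvBresNone (ws msg : String) (hws : ¬ ws = "") (h : ∀ j : Nat, ¬ pvDisj ws j) :
    process_ws_hex_data_alt ws msg = ws := by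
  rw [process_ws_hex_data_alt, if_neg hws]
  simp only []
  by_cases hPS : pvPS ws = []
  · have hparts : PySem.Str.split₀ ws = [] :=
      List.map_eq_nil_iff.mp (show (PySem.Str.split₀ ws).map String.toList = [] from hPS)
    simp only [hparts]
    rw [show PySem.Str.find (" " ++ PySem.Str.join " " [] ++ " ") " 02 02 12 8b " = -1 by decide,
      show PySem.Str.find (" " ++ PySem.Str.join " " [] ++ " ") " 02 02 12 01 " = -1 by decide]
    simp
  · have h8 : pvTokIdx pvMk8 (pvPS ws) = none := by
      cases hc : pvTokIdx pvMk8 (pvPS ws) with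
      | none => rfl
      | some j =>
        obtain ⟨h1, -⟩ := pvTokIdx_some_spec _ _ _ hc
        exact absurd (Or.inl h1) (h j)
    have h1 : pvTokIdx pvMk1 (pvPS ws) = none := by
      cases hc : pvTokIdx pvMk1 (pvPS ws) with
      | none => rfl
      | some j =>
        obtain ⟨h1, -⟩ := pvTokIdx_some_spec _ _ _ hc
        exact absurd (Or.inr h1) (h j)
    rw [pvFind8 ws hPS, pvFind1 ws hPS, h8, h1]
    simp

-- B's output at the first marker index
lemma pvBresSome (ws msg : String) (hws : ¬ ws = "") (i : Nat) (hd : pvDisj ws i)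
    (hmin : ∀ j < i, ¬ pvDisj ws j) :
    process_ws_hex_data_alt ws msg = pvTail msg ((PySem.Str.split₀ ws).drop (i + 4)) := by
  have hPS : pvPS ws ≠ [] := by
    intro he
    have := pvDisjLen ws i hd
    rw [he] at this
    simp at this
  have hnice := pvPSnice ws
  have hi4 := pvDisjLen ws i hd
  rw [process_ws_hex_data_alt, if_neg hws]
  simp only []
  rw [pvFind8 ws hPS, pvFind1 ws hPS]
  -- the find results at the token level
  have hpos : (if (pvTokIdx pvMk8 (pvPS ws)).elim (-1) (fun k => (pvOff (pvPS ws) k : Int)) = -1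
        then (pvTokIdx pvMk1 (pvPS ws)).elim (-1) (fun k => (pvOff (pvPS ws) k : Int))
        else if (pvTokIdx pvMk1 (pvPS ws)).elim (-1) (fun k => (pvOff (pvPS ws) k : Int)) = -1
        then (pvTokIdx pvMk8 (pvPS ws)).elim (-1) (fun k => (pvOff (pvPS ws) k : Int))
        else min ((pvTokIdx pvMk8 (pvPS ws)).elim (-1) (fun k => (pvOff (pvPS ws) k : Int)))
          ((pvTokIdx pvMk1 (pvPS ws)).elim (-1) (fun k => (pvOff (pvPS ws) k : Int))))
      = (pvOff (pvPS ws) i : Int) := by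
    rcases hd with hpre | hpre
    · have h8 : pvTokIdx pvMk8 (pvPS ws) = some i :=
        pvTokIdxEq _ (by decide) _ i hpre (fun j hj hp => hmin j hj (Or.inl hp))
      rw [h8]
      cases hc : pvTokIdx pvMk1 (pvPS ws) with
      | none => simp
      | some j =>
        have hij : i ≤ j := pvTokIdxGe _ _ i (fun k hk hp => hmin k hk (Or.inr hp)) j hc
        have hjlt := pvTokIdx_some_lt _ (by decide) _ _ hc
        have hmono := pvMono (pvPS ws) i j hij
        simp only [Option.elim]
        rw [if_neg (by omega), if_neg (by omega)]
        omega
    · have h1 : pvTokIdx pvMk1 (pvPS ws) = some i :=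
        pvTokIdxEq _ (by decide) _ i hpre (fun j hj hp => hmin j hj (Or.inr hp))
      rw [h1]
      cases hc : pvTokIdx pvMk8 (pvPS ws) with
      | none => simp
      | some j =>
        have hij : i ≤ j := pvTokIdxGe _ _ i (fun k hk hp => hmin k hk (Or.inl hp)) j hc
        have hjlt := pvTokIdx_some_lt _ (by decide) _ _ hc
        have hmono := pvMono (pvPS ws) i j hij
        simp only [Option.elim]
        rw [if_neg (by omega), if_neg (by omega)]
        omega
  rw [hpos]
  rw [if_neg (by omega)]
  -- the sliced remainder re-splits to the tokens after the marker
  have hrest : PySem.Str.split₀ (PySem.Str.slice (" " ++ PySem.Str.join " " (PySem.Str.split₀ ws) ++ " ")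
      (some ((pvOff (pvPS ws) i : Int) + 13)) none) = (PySem.Str.split₀ ws).drop (i + 4) := by
    apply pvStrInj
    rw [PySem.Str.split₀_map_toList, pvSplitEq, PySem.Str.toList_slice]
    rw [PySem.Chars.slice_eq_listSlice, pvPadToList ws hPS]
    rw [show (pvOff (pvPS ws) i : Int) + 13 = ((pvOff (pvPS ws) i + 13 : Nat) : Int) by push_cast; ring,
      PySem.List.slice_from_natCast]
    rw [← List.drop_drop, pvDropPad _ i (by omega)]
    rw [pvDrop13 _ hd, List.drop_drop]
    rw [pvWordsBody _ (fun t ht => hnice t (List.drop_subset _ _ ht))]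
    rw [pvPS, ← List.map_drop]
  rw [hrest, pvTail, pvTail1]

-- ===== VERDICT (by name: the statement is the Claim_ definition above) =====
theorem process_ws_hex_data_spec : Claim_equal_process_ws_hex_data := by
  intro ws msg _
  unfold Spec_process_ws_hex_data
  by_cases hws : ws = ""
  · rw [process_ws_hex_data, process_ws_hex_data_alt, if_pos hws, if_pos hws]
  · have hfirst : (∀ j : Nat, ¬ pvDisj ws j) ∨
        (∃ i : Nat, pvDisj ws i ∧ ∀ j < i, ¬ pvDisj ws j) := by
      cases h8 : pvTokIdx pvMk8 (pvPS ws) with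
      | none =>
        cases h1 : pvTokIdx pvMk1 (pvPS ws) with
        | none =>
          left
          rintro j (hp | hp)
          · exact pvTokIdx_none_spec _ (by decide) _ h8 j hp
          · exact pvTokIdx_none_spec _ (by decide) _ h1 j hp
        | some b =>
          right
          obtain ⟨hb1, hb2⟩ := pvTokIdx_some_spec _ _ _ h1
          refine ⟨b, Or.inr hb1, ?_⟩
          rintro j hj (hp | hp)
          · exact pvTokIdx_none_spec _ (by decide) _ h8 j hp
          · exact hb2 j hj hp
      | some a =>
        obtain ⟨ha1, ha2⟩ := pvTokIdx_some_spec _ _ _ h8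
        cases h1 : pvTokIdx pvMk1 (pvPS ws) with
        | none =>
          right
          refine ⟨a, Or.inl ha1, ?_⟩
          rintro j hj (hp | hp)
          · exact ha2 j hj hp
          · exact pvTokIdx_none_spec _ (by decide) _ h1 j hp
        | some b =>
          right
          obtain ⟨hb1, hb2⟩ := pvTokIdx_some_spec _ _ _ h1
          rcases le_total a b with hab | hab
          · refine ⟨a, Or.inl ha1, ?_⟩
            rintro j hj (hp | hp)
            · exact ha2 j hj hp
            · exact hb2 j (by omega) hp
          · refine ⟨b, Or.inr hb1, ?_⟩
            rintro j hj (hp | hp)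
            · exact ha2 j (by omega) hp
            · exact hb2 j hj hp
    rcases hfirst with hnone | ⟨i, hd, hmin⟩
    · rw [pvAresNone ws msg hws hnone, pvBresNone ws msg hws hnone]
    · rw [pvAresSome ws msg hws i hd hmin, pvBresSome ws msg hws i hd hmin]
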